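-- pv_equiv track=rewrite | github.com/a1yama1ya/advent-of-code | 2024/day7_1.py | create_all_possible_results
-- ===== SOURCE A (Python) =====
-- def create_all_possible_results(elements: list[list[int]]) -> list[set[int]]:
--     all_possible_results = []
--     for row in elements:
--         possible_results = set()
--         possible_results.add(row[0])
--         for element in row[1:]:
--             new_results = set()
--             for result in possible_results:
--                 new_results.add(result + element)
--                 new_results.add(result * element)
--             possible_results = new_results
--         all_possible_results.append(possible_results)
--     return all_possible_results
-- ===== SOURCE B (Python) =====
-- def _eval_all(acc, rest):
--     # all values reachable by applying + or * left-to-right, in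
--     # operator-sequence enumeration order ('+' branch before '*' branch)
--     if not rest:
--         return [acc]
--     e = rest[0]
--     tail = rest[1:]
--     return _eval_all(acc + e, tail) + _eval_all(acc * e, tail)
--
--
-- def create_all_possible_results(elements: list[list[int]]) -> list[set[int]]:
--     return [set(_eval_all(row[0], row[1:])) for row in elements]
-- ===== Notes on version B (the rewrite author's own statement) =====
-- stated objective: alternative
-- what changed: B recursively enumerates every +/* operator sequence per row and evaluates each one left-to-right into a flat list, deduplicating once at the end with set(), instead of A's layer-by-layer expansion of a running deduplicated set.
-- outside the precondition, e.g. on create_all_possible_results([[]]): A raises IndexError, B raises IndexError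
import Mathlib
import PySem

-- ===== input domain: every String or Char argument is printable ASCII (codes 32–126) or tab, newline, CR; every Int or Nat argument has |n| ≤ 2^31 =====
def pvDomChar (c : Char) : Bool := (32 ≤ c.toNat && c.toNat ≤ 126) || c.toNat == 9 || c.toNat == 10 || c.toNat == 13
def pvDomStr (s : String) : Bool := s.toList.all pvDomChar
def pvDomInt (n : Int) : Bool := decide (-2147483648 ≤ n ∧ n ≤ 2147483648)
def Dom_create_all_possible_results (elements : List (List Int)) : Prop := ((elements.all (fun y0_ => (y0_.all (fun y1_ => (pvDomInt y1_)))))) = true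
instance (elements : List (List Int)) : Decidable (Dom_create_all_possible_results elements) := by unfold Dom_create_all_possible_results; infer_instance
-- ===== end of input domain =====

-- B replaces A's layered reachable-set expansion by a recursive enumeration of all
-- +/* operator sequences per row, evaluated left-to-right and deduplicated once at the end
-- (objective: alternative decomposition, same cost).


-- ===== PORT A =====
-- inner loop: for result in possible_results: add result+element; add result*element
def pvStepA (element : Int) (possible_results : PySem.Set Int) : PySem.Set Int :=
  possible_results.foldl
    (fun new_results result =>
      PySem.Set.add (PySem.Set.add new_results (result + element)) (result * element))
    PySem.Set.empty

def create_all_possible_results (elements : List (List Int)) : List (List Int) :=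
  elements.foldl
    (fun all_possible_results row =>
      let possible_results : PySem.Set Int :=
        PySem.Set.add PySem.Set.empty (PySem.List.pyGetD row 0 0)  -- row[0]; total under Pre_
      let possible_results :=
        (PySem.List.slice row (some 1) none).foldl
          (fun possible_results element => pvStepA element possible_results)
          possible_results
      all_possible_results ++ [possible_results])
    []

-- ===== PORT B =====
-- _eval_all: all values reachable by applying + or * left-to-right, '+' branch first
def pvEvalAll (acc : Int) (rest : List Int) : List Int :=
  match rest with
  | [] => [acc]
  | e :: tail => pvEvalAll (acc + e) tail ++ pvEvalAll (acc * e) tail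

def create_all_possible_results_alt (elements : List (List Int)) : List (List Int) :=
  elements.map (fun row =>
    PySem.Set.ofList (pvEvalAll (PySem.List.pyGetD row 0 0) (PySem.List.slice row (some 1) none)))

-- ===== PRECONDITION & SPEC =====
-- Pre_ excludes exactly the inputs containing an empty row, where A's row[0] raises IndexError
-- (B raises there too).
def Pre_create_all_possible_results (elements : List (List Int)) : Prop :=
  ∀ row ∈ elements, row ≠ []
instance (elements : List (List Int)) : Decidable (Pre_create_all_possible_results elements) := by
  unfold Pre_create_all_possible_results; infer_instance

def pvWitness_create_all_possible_results : List (List Int) := [[1, 2, 3], [5]]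

def Spec_create_all_possible_results (elements : List (List Int)) (out : List (List Int)) : Prop := out = create_all_possible_results_alt elements
instance (elements : List (List Int)) (out : List (List Int)) : Decidable (Spec_create_all_possible_results elements out) := by unfold Spec_create_all_possible_results; infer_instance

-- ===== CLAIM (what is proved, stated in full; the proofs are below) =====
def Claim_equal_create_all_possible_results : Prop := ∀ (elements : List (List Int)), Dom_create_all_possible_results elements → Pre_create_all_possible_results elements → Spec_create_all_possible_results elements (create_all_possible_results elements)

-- ===== LEMMAS AND PROOFS =====

theorem pv_add_of_mem {s : PySem.Set Int} {x : Int} (h : x ∈ s) : PySem.Set.add s x = s := by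
  simp [PySem.Set.add, PySem.Set.contains, h]

theorem pv_add_of_not_mem {s : PySem.Set Int} {x : Int} (h : x ∉ s) :
    PySem.Set.add s x = s ++ [x] := by
  simp [PySem.Set.add, PySem.Set.contains, h]

theorem pv_mem_foldl_add {l : List Int} {s : PySem.Set Int} {a : Int} (h : a ∈ s) :
    a ∈ l.foldl PySem.Set.add s := by
  induction l generalizing s with
  | nil => exact h
  | cons x xs ih =>
    exact ih ((PySem.Set.mem_add s x a).mpr (Or.inl h))

theorem pv_mem_foldl_add_left {l : List Int} {s : PySem.Set Int} {a : Int} (h : a ∈ l) :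
    a ∈ l.foldl PySem.Set.add s := by
  induction l generalizing s with
  | nil => cases h
  | cons x xs ih =>
    rcases List.mem_cons.mp h with h | h
    · subst h
      simp only [List.foldl_cons]
      exact pv_mem_foldl_add ((PySem.Set.mem_add s a a).mpr (Or.inr rfl))
    · exact ih h

theorem pv_foldl_add_of_subset {l : List Int} {s : PySem.Set Int} (h : ∀ y ∈ l, y ∈ s) :
    l.foldl PySem.Set.add s = s := by
  induction l with
  | nil => rfl
  | cons x xs ih =>
    simp only [List.foldl_cons, pv_add_of_mem (h x (by simp))]
    exact ih (fun y hy => h y (by simp [hy]))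

theorem pv_ofList_nodup {l : List Int} (h : l.Nodup) : PySem.Set.ofList l = l := by
  induction l using List.reverseRecOn with
  | nil => rfl
  | append_singleton xs x ih =>
    have hx : x ∉ xs := by
      intro hm
      simp only [List.nodup_append, List.nodup_singleton] at h
      tauto
    simp only [PySem.Set.ofList_eq_foldl, List.foldl_append, List.foldl_cons, List.foldl_nil]
    rw [← PySem.Set.ofList_eq_foldl, ih h.of_append_left]
    rw [pv_add_of_not_mem hx]

-- deduplicating before a flatMap does not change the final deduplicated result
theorem pv_foldl_ofList_flatMap (f : Int → List Int) (xs : List Int) :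
    ∀ (t s : PySem.Set Int),
      ((xs.foldl PySem.Set.add t).flatMap f).foldl PySem.Set.add s
        = (xs.flatMap f).foldl PySem.Set.add ((t.flatMap f).foldl PySem.Set.add s) := by
  induction xs with
  | nil => intro t s; simp
  | cons x xs ih =>
    intro t s
    have key : ((PySem.Set.add t x).flatMap f).foldl PySem.Set.add s
        = (f x).foldl PySem.Set.add ((t.flatMap f).foldl PySem.Set.add s) := by
      by_cases hx : x ∈ t
      · rw [pv_add_of_mem hx]
        refine (pv_foldl_add_of_subset ?_).symm
        intro y hy
        exact pv_mem_foldl_add_left (List.mem_flatMap.mpr ⟨x, hx, hy⟩)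
      · rw [pv_add_of_not_mem hx]
        simp [List.foldl_append]
    simp only [List.foldl_cons, ih, key, List.flatMap_cons, List.foldl_append]

theorem pv_ofList_ofList_flatMap (f : Int → List Int) (xs : List Int) :
    PySem.Set.ofList ((PySem.Set.ofList xs).flatMap f) = PySem.Set.ofList (xs.flatMap f) := by
  simp only [PySem.Set.ofList_eq_foldl]
  have := pv_foldl_ofList_flatMap f xs [] []
  simpa using this

theorem pv_stepA_eq (e : Int) (l : PySem.Set Int) :
    pvStepA e l = PySem.Set.ofList (l.flatMap (fun r => [r + e, r * e])) := by
  rw [PySem.Set.ofList_eq_foldl]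
  show l.foldl _ PySem.Set.empty = _
  have : ∀ (s : PySem.Set Int),
      l.foldl (fun ns r => PySem.Set.add (PySem.Set.add ns (r + e)) (r * e)) s
        = (l.flatMap (fun r => [r + e, r * e])).foldl PySem.Set.add s := by
    induction l with
    | nil => intro s; rfl
    | cons x xs ih => intro s; simp [List.foldl_cons, ih]
  exact this PySem.Set.empty

theorem pv_row_eq (rs : List Int) :
    ∀ (l : PySem.Set Int), l.Nodup →
      rs.foldl (fun possible_results element => pvStepA element possible_results) l
        = PySem.Set.ofList (l.flatMap (fun v => pvEvalAll v rs)) := by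
  induction rs with
  | nil =>
    intro l hl
    simpa [pvEvalAll] using (pv_ofList_nodup hl).symm
  | cons e rs ih =>
    intro l hl
    simp only [List.foldl_cons]
    rw [ih (pvStepA e l) (by rw [pv_stepA_eq]; exact PySem.Set.nodup_ofList _)]
    rw [pv_stepA_eq, pv_ofList_ofList_flatMap, List.flatMap_assoc]
    congr 1
    simp [pvEvalAll]

theorem pv_single_row (row : List Int) :
    (PySem.List.slice row (some 1) none).foldl
        (fun possible_results element => pvStepA element possible_results)
        (PySem.Set.add PySem.Set.empty (PySem.List.pyGetD row 0 0))
      = PySem.Set.ofList (pvEvalAll (PySem.List.pyGetD row 0 0) (PySem.List.slice row (some 1) none)) := by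
  have hinit : PySem.Set.add PySem.Set.empty (PySem.List.pyGetD row 0 0)
      = [PySem.List.pyGetD row 0 0] := rfl
  rw [hinit, pv_row_eq _ [PySem.List.pyGetD row 0 0] (List.nodup_singleton _)]
  simp

-- ===== VERDICT (by name: the statement is the Claim_ definition above) =====
theorem create_all_possible_results_spec : Claim_equal_create_all_possible_results := by
  intro elements hdom hpre
  unfold Spec_create_all_possible_results create_all_possible_results create_all_possible_results_alt
  induction elements using List.reverseRecOn with
  | nil => rfl
  | append_singleton xs row ih =>
    have hdx : Dom_create_all_possible_results xs := by
      unfold Dom_create_all_possible_results at hdom ⊢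
      simp only [List.all_append] at hdom
      exact (Bool.and_eq_true_iff.mp hdom).1
    have hpx : Pre_create_all_possible_results xs :=
      fun r hr => hpre r (List.mem_append_left _ hr)
    simp only [List.foldl_append, List.map_append, List.foldl_cons, List.foldl_nil,
      List.map_cons, List.map_nil]
    rw [ih hdx hpx, pv_single_row row]
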